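-- pv_equiv track=rewrite | github.com/AmplifyCo/project-nova | src/core/tools/bash.py | _accesses_sensitive_files
-- ===== SOURCE A (Python) =====
-- def _accesses_sensitive_files(command: str) -> bool:
--     """Check if command attempts to access sensitive files."""
--     sensitive_paths = [
--         '/etc/shadow',
--         '/etc/passwd',  # Reading is ok, but copying/modifying is not
--         '~/.ssh/id_rsa',
--         '/.ssh/',
--         '/root/',
--         '/etc/sudoers',
--     ]
--
--     # Only block write/copy operations to sensitive files
--     write_commands = ['cp', 'mv', 'tee', '>', '>>', 'chmod 777']
--
--     command_lower = command.lower()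
--     for path in sensitive_paths:
--         if path in command_lower:
--             # Check if it's a write operation
--             for write_cmd in write_commands:
--                 if write_cmd in command_lower:
--                     return True
--     return False
-- ===== SOURCE B (Python) =====
-- def _accesses_sensitive_files(command: str) -> bool:
--     """Check if command attempts to access sensitive files."""
--     # One tagged table: True = sensitive path pattern, False = write-command pattern.
--     patterns = [
--         ('/etc/shadow', True),
--         ('/etc/passwd', True),
--         ('~/.ssh/id_rsa', True),
--         ('/.ssh/', True),
--         ('/root/', True),
--         ('/etc/sudoers', True),
--         ('cp', False),
--         ('mv', False),
--         ('tee', False),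
--         ('>', False),
--         ('>>', False),
--         ('chmod 777', False),
--     ]
--     command_lower = command.lower()
--     found_path = False
--     found_write = False
--     for pat, is_path in patterns:
--         if pat in command_lower:
--             if is_path:
--                 found_path = True
--             else:
--                 found_write = True
--     return found_path and found_write
-- ===== Notes on version B (the rewrite author's own statement) =====
-- stated objective: alternative
-- what changed: Fuses the two pattern families into one tagged table scanned in a single pass with two boolean accumulators (no early return, no nested rescans), returning the conjunction of the flags; correct because the write check is independent of which path matched.
import Mathlib
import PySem

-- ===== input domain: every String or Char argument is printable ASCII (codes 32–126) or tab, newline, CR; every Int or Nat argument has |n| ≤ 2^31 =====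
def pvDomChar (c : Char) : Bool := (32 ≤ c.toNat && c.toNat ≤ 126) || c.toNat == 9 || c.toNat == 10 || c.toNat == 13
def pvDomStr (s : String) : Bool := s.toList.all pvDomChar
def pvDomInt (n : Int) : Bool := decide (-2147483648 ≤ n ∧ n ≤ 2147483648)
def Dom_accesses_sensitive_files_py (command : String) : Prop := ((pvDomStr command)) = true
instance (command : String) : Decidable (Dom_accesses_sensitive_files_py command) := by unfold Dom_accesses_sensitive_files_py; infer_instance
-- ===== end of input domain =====

-- B fuses the two pattern families into one tagged table scanned in a single pass with
-- two boolean accumulators, returning the conjunction of the flags (alternative decomposition).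
-- ===== PORT A =====
def pvSensitivePaths : List String :=
  ["/etc/shadow", "/etc/passwd", "~/.ssh/id_rsa", "/.ssh/", "/root/", "/etc/sudoers"]
def pvWriteCommands : List String := ["cp", "mv", "tee", ">", ">>", "chmod 777"]
-- inner 'for write_cmd in write_commands: if write_cmd in command_lower: return True'
def pvInnerA (ws : List String) (cl : String) : Bool :=
  match ws with
  | [] => false
  | w :: rest => if PySem.Str.isIn w cl then true else pvInnerA rest cl
-- outer 'for path in sensitive_paths: if path in command_lower: <inner>' ; falls through to next path
def pvOuterA (paths : List String) (ws : List String) (cl : String) : Bool :=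
  match paths with
  | [] => false
  | p :: rest =>
    if PySem.Str.isIn p cl then
      (if pvInnerA ws cl then true else pvOuterA rest ws cl)
    else pvOuterA rest ws cl
def accesses_sensitive_files_py (command : String) : Bool :=
  pvOuterA pvSensitivePaths pvWriteCommands (PySem.Str.lower command)
-- ===== PORT B =====
-- the tagged table of Source B: (pattern, is_path)
def pvPatterns : List (String × Bool) :=
  [("/etc/shadow", true), ("/etc/passwd", true), ("~/.ssh/id_rsa", true),
   ("/.ssh/", true), ("/root/", true), ("/etc/sudoers", true),
   ("cp", false), ("mv", false), ("tee", false), (">", false), (">>", false),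
   ("chmod 777", false)]
-- the single 'for pat, is_path in patterns' loop of Source B, state = (found_path, found_write)
def pvScanB (cl : String) (st : Bool × Bool) (pats : List (String × Bool)) : Bool × Bool :=
  match pats with
  | [] => st
  | (pat, isPath) :: rest =>
    let st' :=
      if PySem.Str.isIn pat cl then
        (if isPath then (true, st.2) else (st.1, true))
      else st
    pvScanB cl st' rest
def accesses_sensitive_files_py_alt (command : String) : Bool :=
  let cl := PySem.Str.lower command
  let st := pvScanB cl (false, false) pvPatterns
  st.1 && st.2
-- ===== PRECONDITION & SPEC =====
def Spec_accesses_sensitive_files_py (command : String) (out : Bool) : Prop := out = accesses_sensitive_files_py_alt command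
instance (command : String) (out : Bool) : Decidable (Spec_accesses_sensitive_files_py command out) := by unfold Spec_accesses_sensitive_files_py; infer_instance
-- ===== CLAIM =====
def Claim_equal_accesses_sensitive_files_py : Prop := ∀ (command : String), Dom_accesses_sensitive_files_py command → Spec_accesses_sensitive_files_py command (accesses_sensitive_files_py command)
-- ===== LEMMAS AND PROOFS =====
theorem pvInnerA_eq_any (ws : List String) (cl : String) :
    pvInnerA ws cl = ws.any (fun w => PySem.Str.isIn w cl) := by
  induction ws with
  | nil => rfl
  | cons w rest ih => cases h : PySem.Str.isIn w cl <;> simp [pvInnerA, ih]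
theorem pvOuterA_eq (paths ws : List String) (cl : String) :
    pvOuterA paths ws cl =
      ((paths.any (fun p => PySem.Str.isIn p cl)) && (ws.any (fun w => PySem.Str.isIn w cl))) := by
  induction paths with
  | nil => rfl
  | cons p rest ih =>
    simp only [pvOuterA, pvInnerA_eq_any, ih, List.any_cons]
    cases h1 : PySem.Str.isIn p cl <;> cases h2 : ws.any (fun w => PySem.Str.isIn w cl) <;> simp
-- the B scan collects exactly "some tagged-true pattern matched" / "some tagged-false pattern matched"
theorem pvScanB_eq (cl : String) (st : Bool × Bool) (pats : List (String × Bool)) :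
    pvScanB cl st pats =
      (st.1 || pats.any (fun q => q.2 && PySem.Str.isIn q.1 cl),
       st.2 || pats.any (fun q => !q.2 && PySem.Str.isIn q.1 cl)) := by
  induction pats generalizing st with
  | nil => simp [pvScanB]
  | cons q rest ih =>
    obtain ⟨pat, isPath⟩ := q
    simp only [pvScanB, List.any_cons]
    cases h : PySem.Str.isIn pat cl <;> cases isPath <;>
      simp [ih]
-- ===== VERDICT =====
theorem accesses_sensitive_files_py_spec : Claim_equal_accesses_sensitive_files_py := by
  intro command _
  unfold Spec_accesses_sensitive_files_py accesses_sensitive_files_py accesses_sensitive_files_py_alt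
  show _ = ((pvScanB _ (false, false) pvPatterns).1 && (pvScanB _ (false, false) pvPatterns).2)
  rw [pvOuterA_eq, pvScanB_eq]
  simp [pvSensitivePaths, pvWriteCommands, pvPatterns]
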